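-- pv_equiv track=rewrite | github.com/Aasritha-Varshini/AI-Enhanced-Task-Scheduling-Chatbot | scheduler.py | get_time_slots_for_day
-- ===== SOURCE A (Python) =====
-- WORK_START = 9
--
-- WORK_END = 18
--
-- def get_time_slots_for_day(date, occupied_slots, hours_needed):
--     """
--     Finds available hourly slots for a given day until the required hours are filled.
--     """
--     slots = []
--     current_hour = WORK_START
--
--     while current_hour < WORK_END and hours_needed > 0:
--         time_str = f"{date} {current_hour:02d}:00"
--         if time_str not in occupied_slots:
--             slots.append((date, current_hour))
--             occupied_slots.add(time_str)
--             hours_needed -= 1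
--         current_hour += 1
--
--     return slots, occupied_slots
-- ===== SOURCE B (Python) =====
-- WORK_START = 9
--
-- WORK_END = 18
--
-- def get_time_slots_for_day(date, occupied_slots, hours_needed):
--     """Three-phase rewrite: filter the free hours, cut the needed prefix, then commit."""
--     free = [h for h in range(WORK_START, WORK_END)
--             if f"{date} {h:02d}:00" not in occupied_slots]
--     chosen = free[:max(hours_needed, 0)]
--     for h in chosen:
--         occupied_slots.add(f"{date} {h:02d}:00")
--     return [(date, h) for h in chosen], occupied_slots
-- ===== Notes on version B (the rewrite author's own statement) =====
-- stated objective: alternative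
-- what changed: Replaces A's single interleaved while-loop (hour counter, countdown of hours_needed, early exit, mutation of the set inside the scan) by three separate phases: filter all free hours of the day, take the max(hours_needed,0)-prefix, then commit those slots to the set; correct because the hourly slot strings of one day are pairwise distinct, so the in-loop set insertions of A never affect later membership tests.
import Mathlib
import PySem

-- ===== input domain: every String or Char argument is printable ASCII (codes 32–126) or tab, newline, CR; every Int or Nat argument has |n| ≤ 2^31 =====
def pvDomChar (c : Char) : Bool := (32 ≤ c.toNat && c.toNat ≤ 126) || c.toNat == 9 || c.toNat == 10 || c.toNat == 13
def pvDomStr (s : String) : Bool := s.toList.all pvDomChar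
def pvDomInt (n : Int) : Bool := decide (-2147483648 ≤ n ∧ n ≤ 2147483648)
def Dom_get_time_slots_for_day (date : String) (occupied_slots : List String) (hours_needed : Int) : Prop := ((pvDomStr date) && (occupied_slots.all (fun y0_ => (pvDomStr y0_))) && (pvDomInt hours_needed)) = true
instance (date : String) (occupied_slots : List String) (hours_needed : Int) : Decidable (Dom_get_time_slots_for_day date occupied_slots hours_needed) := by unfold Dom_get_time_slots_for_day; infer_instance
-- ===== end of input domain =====

-- B replaces A's interleaved scan (countdown + in-loop set mutation) by three phases —
-- filter free hours, take the needed prefix, commit to the set; same return value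
-- (both mutate the occupied-slots set identically; the equivalence is about the returned pair).


-- ===== PORT A =====
-- f"{date} {h:02d}:00"; the %02d zero-pad is str(h).zfill(2) — exact for the 0 ≤ h < 100 hours used
def pvTimeStr (date : String) (h : Int) : String :=
  PySem.Str.join "" [date, " ", PySem.Str.zfill (PySem.Int.toStr h) 2, ":00"]

-- A's while-loop: state (slots, occupied_slots, hours_needed, current_hour); WORK_START = 9, WORK_END = 18
def pvALoop (date : String) (occ : PySem.Set String) (hours_needed : Int) (current_hour : Int)
    (slots : List (String × Int)) : (List (String × Int)) × List String :=
  if _hc : current_hour < 18 ∧ 0 < hours_needed then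
    if PySem.Set.contains occ (pvTimeStr date current_hour) then
      pvALoop date occ hours_needed (current_hour + 1) slots
    else
      pvALoop date (PySem.Set.add occ (pvTimeStr date current_hour)) (hours_needed - 1)
        (current_hour + 1) (slots ++ [(date, current_hour)])
  else (slots, occ)
termination_by (18 - current_hour).toNat
decreasing_by all_goals omega

def get_time_slots_for_day (date : String) (occupied_slots : List String) (hours_needed : Int) : (List (String × Int)) × List String :=
  pvALoop date (PySem.Set.ofList occupied_slots) hours_needed 9 []

-- ===== PORT B =====
def get_time_slots_for_day_alt (date : String) (occupied_slots : List String) (hours_needed : Int) : (List (String × Int)) × List String :=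
  let occ : PySem.Set String := PySem.Set.ofList occupied_slots
  let free := (PySem.List.pyRange 9 18 1).filter (fun h => !(PySem.Set.contains occ (pvTimeStr date h)))
  let chosen := PySem.List.slice free none (some (max hours_needed 0))
  (chosen.map (fun h => (date, h)), chosen.foldl (fun o h => PySem.Set.add o (pvTimeStr date h)) occ)

-- ===== PRECONDITION & SPEC =====
def Spec_get_time_slots_for_day (date : String) (occupied_slots : List String) (hours_needed : Int) (out : (List (String × Int)) × List String) : Prop := out = get_time_slots_for_day_alt date occupied_slots hours_needed
instance (date : String) (occupied_slots : List String) (hours_needed : Int) (out : (List (String × Int)) × List String) : Decidable (Spec_get_time_slots_for_day date occupied_slots hours_needed out) := by unfold Spec_get_time_slots_for_day; infer_instance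

-- ===== CLAIM (what is proved, stated in full; the proofs are below) =====
def Claim_equal_get_time_slots_for_day : Prop := ∀ (date : String) (occupied_slots : List String) (hours_needed : Int), Dom_get_time_slots_for_day date occupied_slots hours_needed → Spec_get_time_slots_for_day date occupied_slots hours_needed (get_time_slots_for_day date occupied_slots hours_needed)

-- ===== LEMMAS AND PROOFS =====

lemma pvToList_timeStr (date : String) (h : Int) :
    (pvTimeStr date h).toList
      = date.toList ++ (' ' :: ((PySem.Str.zfill (PySem.Int.toStr h) 2).toList ++ [':', '0', '0'])) := by
  simp [pvTimeStr, PySem.Str.toList_join, PySem.Chars.join, List.intercalate]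

-- slot strings of distinct hours of the working day are distinct
lemma pvTimeStr_ne (date : String) {h k : Int} (h1 : 9 ≤ h) (h2 : h < 18) (h3 : 9 ≤ k)
    (h4 : k < 18) (hne : k ≠ h) : pvTimeStr date k ≠ pvTimeStr date h := by
  intro he
  have hl := congrArg String.toList he
  rw [pvToList_timeStr, pvToList_timeStr] at hl
  have h5 : (PySem.Str.zfill (PySem.Int.toStr k) 2).toList
      = (PySem.Str.zfill (PySem.Int.toStr h) 2).toList := by
    have := List.append_cancel_left hl
    simpa using this
  interval_cases h <;> interval_cases k <;> first
    | exact hne rfl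
    | (revert h5; decide)

lemma pvContains_add_of_ne (s : PySem.Set String) (x y : String) (h : y ≠ x) :
    PySem.Set.contains (PySem.Set.add s x) y = PySem.Set.contains s y := by
  by_cases hm : x ∈ s <;>
    simp [PySem.Set.add, PySem.Set.contains, hm, List.mem_append, h]

-- A's loop from hour h computes B's three phases over the remaining hours [h, 18)
lemma pvALoop_eq (date : String) : ∀ (n : Nat) (h : Int), (18 - h).toNat = n → 9 ≤ h →
    ∀ (occ : PySem.Set String) (hn : Int) (slots : List (String × Int)),
    pvALoop date occ hn h slots =
      (slots ++ (((PySem.List.pyRange h 18 1).filter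
            (fun k => !(PySem.Set.contains occ (pvTimeStr date k)))).take hn.toNat).map
            (fun k => (date, k)),
       (((PySem.List.pyRange h 18 1).filter
            (fun k => !(PySem.Set.contains occ (pvTimeStr date k)))).take hn.toNat).foldl
            (fun o k => PySem.Set.add o (pvTimeStr date k)) occ) := by
  intro n
  induction n with
  | zero =>
    intro h hn0 h9 occ hn slots
    have h18 : ¬ h < 18 := by omega
    rw [pvALoop, dif_neg (by omega), PySem.List.pyRange_one_eq_nil (by omega)]
    simp
  | succ m ih =>
    intro h hm h9 occ hn slots
    by_cases h18 : h < 18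
    · rw [PySem.List.pyRange_one_cons h18]
      by_cases hpos : 0 < hn
      · rw [pvALoop, dif_pos ⟨h18, hpos⟩]
        by_cases hc : PySem.Set.contains occ (pvTimeStr date h) = true
        · rw [if_pos hc, ih (h + 1) (by omega) (by omega) occ hn slots]
          have hmem : pvTimeStr date h ∈ occ := by
            simpa [PySem.Set.contains] using hc
          simp [hmem]
        · rw [if_neg hc, ih (h + 1) (by omega) (by omega)
            (PySem.Set.add occ (pvTimeStr date h)) (hn - 1) (slots ++ [(date, h)])]
          have hfil : (PySem.List.pyRange (h + 1) 18 1).filter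
                (fun k => !(PySem.Set.contains (PySem.Set.add occ (pvTimeStr date h)) (pvTimeStr date k)))
              = (PySem.List.pyRange (h + 1) 18 1).filter
                (fun k => !(PySem.Set.contains occ (pvTimeStr date k))) := by
            apply List.filter_congr
            intro k hk
            rw [PySem.List.mem_pyRange_one] at hk
            rw [pvContains_add_of_ne occ (pvTimeStr date h) (pvTimeStr date k)
              (pvTimeStr_ne date h9 h18 (by omega) (by omega) (by omega))]
          have htn : hn.toNat = (hn - 1).toNat + 1 := by omega
          rw [hfil]
          simp only [List.filter_cons, hc, Bool.not_false, if_pos, htn, List.take_succ_cons,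
            List.map_cons, List.foldl_cons]
          simp
      · rw [pvALoop, dif_neg (by omega)]
        have : hn.toNat = 0 := by omega
        simp [this]
    · rw [pvALoop, dif_neg (by omega), PySem.List.pyRange_one_eq_nil (by omega)]
      simp

-- ===== VERDICT (by name: the statement is the Claim_ definition above) =====
theorem get_time_slots_for_day_spec : Claim_equal_get_time_slots_for_day := by
  intro date occupied_slots hours_needed _
  unfold Spec_get_time_slots_for_day get_time_slots_for_day get_time_slots_for_day_alt
  rw [pvALoop_eq date 9 9 (by decide) (by omega)]
  dsimp only
  rw [PySem.List.slice_to _ (by omega : (0:Int) ≤ max hours_needed 0)]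
  have : (max hours_needed 0).toNat = hours_needed.toNat := by omega
  simp [this]
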